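-- pv_equiv track=rewrite | github.com/jiadaizhao/LintCode | 1601-1700/1644-Plane Maximum Rectangle/1644-Plane Maximum Rectangle.py | getMaximum
-- ===== SOURCE A (Python) =====
-- def getMaximum(a):
--     # write your code here
--     table = set(map(tuple, a))
--     maxArea = 0
--     for j, p2 in enumerate(a):
--         for i in range(j):
--             p1 = a[i]
--             if p1[0] == p2[0] or p1[1] == p2[1]:
--                 continue
--             if (p1[0], p2[1]) in table and (p2[0], p1[1]) in table:
--                 maxArea = max(maxArea, abs((p2[0] - p1[0])*(p2[1] - p1[1])))
--     return maxArea
-- ===== SOURCE B (Python) =====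
-- def getMaximum(a):
--     # Group the points into columns by x-coordinate; for each pair of columns, a
--     # rectangle pairs a y-value from each column whose opposite corner is itself a
--     # listed point, and the best one uses the extreme such y-values.
--     pts = set(map(tuple, a))
--     cols = {}
--     for p in a:
--         cols.setdefault(p[0], set()).add(p[1])
--     xs = list(cols)
--     best = 0
--     for j in range(len(xs)):
--         for i in range(j):
--             x1, x2 = xs[i], xs[j]
--             s12 = {y for y in cols[x2] if (x1, y) in pts}
--             s21 = {y for y in cols[x1] if (x2, y) in pts}
--             if s12 and s21:
--                 d = max(max(s12) - min(s21), max(s21) - min(s12))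
--                 if d > 0:
--                     best = max(best, abs(x2 - x1) * d)
--     return best
-- ===== Notes on version B (the rewrite author's own statement) =====
-- stated objective: alternative
-- what changed: Instead of testing every ordered pair of listed points with per-pair skip conditions and corner probes, B groups the points once into columns keyed by x and, for each pair of distinct columns, keeps only the y-values whose opposite corner is itself a listed point and combines their extremes into one area per column pair; Pre_ excludes inputs containing a point with fewer than two coordinates, on which A raises IndexError except in degenerate corners where no comparison reaches the missing coordinate.
-- outside the precondition, e.g. on getMaximum([[5]]): A returns 0, B raises IndexError
import Mathlib
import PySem

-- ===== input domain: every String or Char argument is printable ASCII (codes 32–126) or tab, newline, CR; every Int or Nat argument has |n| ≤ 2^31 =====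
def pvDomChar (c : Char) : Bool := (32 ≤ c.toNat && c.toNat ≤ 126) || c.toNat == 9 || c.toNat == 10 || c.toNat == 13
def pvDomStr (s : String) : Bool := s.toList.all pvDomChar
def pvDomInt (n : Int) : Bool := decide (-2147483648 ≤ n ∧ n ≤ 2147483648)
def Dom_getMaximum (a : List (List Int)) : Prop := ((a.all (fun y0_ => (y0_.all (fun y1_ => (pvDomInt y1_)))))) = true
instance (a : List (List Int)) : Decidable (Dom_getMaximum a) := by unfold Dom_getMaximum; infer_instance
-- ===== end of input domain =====

-- B groups the points into x-columns once and, for each pair of columns, combines the extreme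
-- y-values whose opposite corner is itself a listed point, instead of A's pairwise
-- corner-membership scan over the raw list (alternative decomposition, same worst-case cost).


-- ===== PORT A =====
-- 'table = set(map(tuple, a))'; tuple membership is list equality on List Int.
-- p[0]/p[1] via pyGetD: always in range under Pre_ (every point has ≥ 2 coordinates).
def getMaximum (a : List (List Int)) : Int :=
  let table : PySem.Set (List Int) := PySem.Set.ofList a
  (PySem.List.enumerate a).foldl (fun maxArea jp =>
    (PySem.List.pyRange 0 jp.1 1).foldl (fun maxArea i =>
      let p1 := PySem.List.pyGetD a i []
      if PySem.List.pyGetD p1 0 0 = PySem.List.pyGetD jp.2 0 0 ∨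
         PySem.List.pyGetD p1 1 0 = PySem.List.pyGetD jp.2 1 0 then maxArea
      else if PySem.Set.contains table [PySem.List.pyGetD p1 0 0, PySem.List.pyGetD jp.2 1 0] &&
              PySem.Set.contains table [PySem.List.pyGetD jp.2 0 0, PySem.List.pyGetD p1 1 0] then
        max maxArea |(PySem.List.pyGetD jp.2 0 0 - PySem.List.pyGetD p1 0 0) *
                     (PySem.List.pyGetD jp.2 1 0 - PySem.List.pyGetD p1 1 0)|
      else maxArea) maxArea) 0

-- ===== PORT B =====
-- 'pts = set(map(tuple, a))' is the set of listed points.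
-- 'cols.setdefault(p[0], set()).add(p[1])': the stored set at key p[0] gains p[1]
-- (setdefault's fresh empty set is the getD default).
def pvColsOf (a : List (List Int)) : PySem.Dict Int (PySem.Set Int) :=
  a.foldl (fun d p =>
    d.insert (PySem.List.pyGetD p 0 0)
      (PySem.Set.add (d.getD (PySem.List.pyGetD p 0 0) PySem.Set.empty)
        (PySem.List.pyGetD p 1 0))) PySem.Dict.empty

def getMaximum_alt (a : List (List Int)) : Int :=
  let pts : PySem.Set (List Int) := PySem.Set.ofList a
  let cols := pvColsOf a
  let xs := cols.keys
  (PySem.List.pyRange 0 (xs.length : Int) 1).foldl (fun best j =>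
    (PySem.List.pyRange 0 j 1).foldl (fun best i =>
      -- 'cols[xs[i]]': the key comes from cols itself, so the lookup never raises;
      -- getD with the empty set is that lookup.  The set comprehensions filter a
      -- duplicate-free set, so List.filter is exact.
      let x1 := PySem.List.pyGetD xs i 0
      let x2 := PySem.List.pyGetD xs j 0
      let s12 := (cols.getD x2 PySem.Set.empty).filter (fun y => PySem.Set.contains pts [x1, y])
      let s21 := (cols.getD x1 PySem.Set.empty).filter (fun y => PySem.Set.contains pts [x2, y])
      if s12 ≠ [] ∧ s21 ≠ [] then
        -- max(...)/min(...): both sets are nonempty here, so max?/min? are some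
        let d := max ((PySem.List.max? s12 (fun y => y)).getD 0 -
                      (PySem.List.min? s21 (fun y => y)).getD 0)
                     ((PySem.List.max? s21 (fun y => y)).getD 0 -
                      (PySem.List.min? s12 (fun y => y)).getD 0)
        if 0 < d then max best (|x2 - x1| * d) else best
      else best) best) 0

-- ===== PRECONDITION & SPEC =====
-- Pre_ excludes inputs containing a point of fewer than two coordinates: A raises
-- IndexError as soon as such a point is compared with a point of different x, and
-- returns only in degenerate corners where no comparison reaches the missing
-- coordinate; B reads p[0] and p[1] of every point and raises there itself.
def Pre_getMaximum (a : List (List Int)) : Prop := ∀ p ∈ a, 2 ≤ p.length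
instance (a : List (List Int)) : Decidable (Pre_getMaximum a) := by unfold Pre_getMaximum; infer_instance

def pvWitness_getMaximum : List (List Int) := [[0, 0], [0, 2], [3, 0], [3, 2], [1, 1, 7]]

def Spec_getMaximum (a : List (List Int)) (out : Int) : Prop := out = getMaximum_alt a
instance (a : List (List Int)) (out : Int) : Decidable (Spec_getMaximum a out) := by unfold Spec_getMaximum; infer_instance

-- ===== CLAIM (what is proved, stated in full; the proofs are below) =====
def Claim_equal_getMaximum : Prop := ∀ (a : List (List Int)), Dom_getMaximum a → Pre_getMaximum a → Spec_getMaximum a (getMaximum a)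

-- ===== LEMMAS AND PROOFS =====

-- (x, y) is the first-two-coordinates projection of some point of a
def PvPt (a : List (List Int)) (x y : Int) : Prop :=
  ∃ p ∈ a, PySem.List.pyGetD p 0 0 = x ∧ PySem.List.pyGetD p 1 0 = y

-- a rectangle candidate considered by A: two diagonal points (any arity) with their
-- two completing corners present as listed points, c its area
def IsCand (a : List (List Int)) (c : Int) : Prop :=
  ∃ x1 y1 x2 y2 : Int, PvPt a x1 y1 ∧ PvPt a x2 y2 ∧ [x1, y2] ∈ a ∧ [x2, y1] ∈ a ∧
    x1 ≠ x2 ∧ y1 ≠ y2 ∧ c = |(x2 - x1) * (y2 - y1)|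

-- generic fold machinery
theorem pvFoldlInv {α : Type} (Q : Int → Prop) (l : List α) (f : Int → α → Int) (init : Int)
    (h0 : Q init) (hstep : ∀ acc x, x ∈ l → Q acc → Q (f acc x)) : Q (l.foldl f init) := by
  induction l generalizing init with
  | nil => exact h0
  | cons x t ih =>
      exact ih (f init x) (hstep init x (by simp) h0)
        (fun acc y hy hQ => hstep acc y (by simp [hy]) hQ)

theorem pvFoldlMono {α : Type} (l : List α) (f : Int → α → Int) (init : Int)
    (hmono : ∀ acc x, x ∈ l → acc ≤ f acc x) : init ≤ l.foldl f init :=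
  pvFoldlInv (fun r => init ≤ r) l f init le_rfl
    (fun acc x hx h => le_trans h (hmono acc x hx))

theorem pvFoldlGe {α : Type} (l : List α) (f : Int → α → Int) (init c : Int)
    (hmono : ∀ acc x, x ∈ l → acc ≤ f acc x)
    (hx : ∃ x ∈ l, ∀ acc, c ≤ f acc x) : c ≤ l.foldl f init := by
  induction l generalizing init with
  | nil => rcases hx with ⟨x, hx, _⟩; cases hx
  | cons y t ih =>
      rcases hx with ⟨x, hxmem, hxf⟩
      rcases List.mem_cons.mp hxmem with h | h
      · subst h
        have h1 : c ≤ f init x := hxf init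
        have h2 : f init x ≤ t.foldl f (f init x) :=
          pvFoldlMono t f (f init x) (fun acc z hz => hmono acc z (by simp [hz]))
        exact le_trans h1 h2
      · exact ih (f init y) (fun acc z hz => hmono acc z (by simp [hz])) ⟨x, h, hxf⟩

theorem pvMemColsAux (a : List (List Int)) (d : PySem.Dict Int (PySem.Set Int)) (x y : Int) :
    y ∈ (a.foldl (fun d p =>
        d.insert (PySem.List.pyGetD p 0 0)
          (PySem.Set.add (d.getD (PySem.List.pyGetD p 0 0) PySem.Set.empty)
            (PySem.List.pyGetD p 1 0))) d).getD x PySem.Set.empty ↔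
      y ∈ d.getD x PySem.Set.empty ∨
        ∃ p ∈ a, PySem.List.pyGetD p 0 0 = x ∧ PySem.List.pyGetD p 1 0 = y := by
  induction a generalizing d with
  | nil => simp
  | cons q t ih =>
      simp only [List.foldl_cons, ih, List.mem_cons]
      rw [PySem.Dict.getD_insert]
      constructor
      · rintro (h | ⟨p, hp, hx, hy⟩)
        · by_cases hq : x = PySem.List.pyGetD q 0 0
          · simp only [if_pos hq] at h
            rcases (PySem.Set.mem_add _ _ _).mp h with h | h
            · subst hq; exact Or.inl h
            · exact Or.inr ⟨q, Or.inl rfl, hq.symm, h.symm⟩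
          · simp only [if_neg hq] at h; exact Or.inl h
        · exact Or.inr ⟨p, Or.inr hp, hx, hy⟩
      · rintro (h | ⟨p, hp | hp, hx, hy⟩)
        · by_cases hq : x = PySem.List.pyGetD q 0 0
          · subst hq
            exact Or.inl (by rw [if_pos rfl]; exact (PySem.Set.mem_add _ _ _).mpr (Or.inl h))
          · exact Or.inl (by simpa [if_neg hq] using h)
        · subst hp
          refine Or.inl ?_
          rw [if_pos hx.symm]
          exact (PySem.Set.mem_add _ _ _).mpr (Or.inr hy.symm)
        · exact Or.inr ⟨p, hp, hx, hy⟩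

theorem pvMemCols (a : List (List Int)) (x y : Int) :
    y ∈ (pvColsOf a).getD x PySem.Set.empty ↔ PvPt a x y := by
  have := pvMemColsAux a PySem.Dict.empty x y
  simpa [pvColsOf, PvPt] using this

theorem pvMemKeysAux (a : List (List Int)) (d : PySem.Dict Int (PySem.Set Int)) (x : Int) :
    x ∈ (a.foldl (fun d p =>
        d.insert (PySem.List.pyGetD p 0 0)
          (PySem.Set.add (d.getD (PySem.List.pyGetD p 0 0) PySem.Set.empty)
            (PySem.List.pyGetD p 1 0))) d).keys ↔
      x ∈ d.keys ∨ ∃ p ∈ a, PySem.List.pyGetD p 0 0 = x := by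
  induction a generalizing d with
  | nil => simp
  | cons q t ih =>
      simp only [List.foldl_cons, ih, PySem.Dict.mem_keys_insert, List.mem_cons]
      constructor
      · rintro ((h | h) | ⟨p, hp, hx⟩)
        · exact Or.inr ⟨q, Or.inl rfl, h.symm⟩
        · exact Or.inl h
        · exact Or.inr ⟨p, Or.inr hp, hx⟩
      · rintro (h | ⟨p, hp | hp, hx⟩)
        · exact Or.inl (Or.inr h)
        · subst hp; exact Or.inl (Or.inl hx.symm)
        · exact Or.inr ⟨p, hp, hx⟩

theorem pvMemKeys (a : List (List Int)) (x : Int) :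
    x ∈ (pvColsOf a).keys ↔ ∃ p ∈ a, PySem.List.pyGetD p 0 0 = x := by
  have := pvMemKeysAux a PySem.Dict.empty x
  simpa [pvColsOf] using this

theorem pvColsKeysNodup (a : List (List Int)) : (pvColsOf a).keys.Nodup :=
  PySem.Dict.nodup_keys_foldl_insert_key a (fun p => PySem.List.pyGetD p 0 0) _
    PySem.Dict.empty PySem.Dict.nodup_keys_empty

-- membership in B's set comprehensions
theorem pvMemS (a : List (List Int)) (xc xo y : Int) :
    y ∈ ((pvColsOf a).getD xc PySem.Set.empty).filter
        (fun y => PySem.Set.contains (PySem.Set.ofList a) [xo, y]) ↔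
      PvPt a xc y ∧ [xo, y] ∈ a := by
  rw [List.mem_filter, pvMemCols]
  constructor
  · rintro ⟨h1, h2⟩
    rw [PySem.Set.contains_eq_listContains] at h2
    exact ⟨h1, by simpa [PySem.Set.mem_ofList] using h2⟩
  · rintro ⟨h1, h2⟩
    refine ⟨h1, ?_⟩
    rw [PySem.Set.contains_eq_listContains]
    simpa [PySem.Set.mem_ofList] using h2

-- ===== A-side lemmas =====

theorem pvAInnerMono (a : List (List Int)) (jp : Int × List Int) (acc : Int) :
    acc ≤ (PySem.List.pyRange 0 jp.1 1).foldl (fun maxArea i =>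
      let p1 := PySem.List.pyGetD a i []
      if PySem.List.pyGetD p1 0 0 = PySem.List.pyGetD jp.2 0 0 ∨
         PySem.List.pyGetD p1 1 0 = PySem.List.pyGetD jp.2 1 0 then maxArea
      else if PySem.Set.contains (PySem.Set.ofList a) [PySem.List.pyGetD p1 0 0, PySem.List.pyGetD jp.2 1 0] &&
              PySem.Set.contains (PySem.Set.ofList a) [PySem.List.pyGetD jp.2 0 0, PySem.List.pyGetD p1 1 0] then
        max maxArea |(PySem.List.pyGetD jp.2 0 0 - PySem.List.pyGetD p1 0 0) *
                     (PySem.List.pyGetD jp.2 1 0 - PySem.List.pyGetD p1 1 0)|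
      else maxArea) acc := by
  apply pvFoldlMono
  intro acc i _
  dsimp only
  split_ifs <;> simp

theorem pvAHit (a : List (List Int)) (k1 k2 : Nat) (hk : k1 < k2) (h2 : k2 < a.length)
    (x1 y1 x2 y2 : Int)
    (e10 : PySem.List.pyGetD (a[k1]'(lt_trans hk h2)) 0 0 = x1)
    (e11 : PySem.List.pyGetD (a[k1]'(lt_trans hk h2)) 1 0 = y1)
    (e20 : PySem.List.pyGetD (a[k2]'h2) 0 0 = x2)
    (e21 : PySem.List.pyGetD (a[k2]'h2) 1 0 = y2)
    (hx : x1 ≠ x2) (hy : y1 ≠ y2) (c1 : [x1, y2] ∈ a) (c2 : [x2, y1] ∈ a) :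
    |(x2 - x1) * (y2 - y1)| ≤ getMaximum a := by
  have hk1 : k1 < a.length := lt_trans hk h2
  unfold getMaximum
  apply pvFoldlGe
  · intro acc jp _; exact pvAInnerMono a jp acc
  · refine ⟨((k2 : Int), a[k2]), ?_, ?_⟩
    · rw [PySem.List.mem_enumerate_iff]
      exact ⟨k2, h2, by simp⟩
    · intro acc
      apply pvFoldlGe
      · intro acc i _
        dsimp only
        split_ifs <;> simp
      · refine ⟨(k1 : Int), ?_, ?_⟩
        · rw [PySem.List.mem_pyRange_one]
          dsimp only
          exact ⟨Int.natCast_nonneg k1, by exact_mod_cast hk⟩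
        · intro acc
          have hp1 : PySem.List.pyGetD a (k1 : Int) [] = a[k1] := by
            rw [PySem.List.pyGetD_natCast, List.getD_eq_getElem _ _ hk1]
          dsimp only
          rw [hp1, e10, e11, e20, e21]
          rw [if_neg (by push Not; exact ⟨hx, hy⟩)]
          rw [if_pos]
          · exact le_max_right _ _
          · rw [Bool.and_eq_true]
            constructor <;> rw [PySem.Set.contains_iff, PySem.Set.mem_ofList]
            · exact c1
            · exact c2

theorem pvAUb (a : List (List Int)) (c : Int) (hc : IsCand a c) : c ≤ getMaximum a := by
  obtain ⟨x1, y1, x2, y2, ⟨p, hp, hp0, hp1⟩, ⟨q, hq, hq0, hq1⟩, m3, m4, hx, hy, hceq⟩ := hc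
  obtain ⟨k1, hk1, e1⟩ := List.mem_iff_getElem.mp hp
  obtain ⟨k2, hk2, e2⟩ := List.mem_iff_getElem.mp hq
  have hne : k1 ≠ k2 := by
    intro h; subst h
    rw [e1] at e2; subst e2
    exact hx ((hp0.symm.trans hq0))
  rcases Nat.lt_or_ge k1 k2 with h | h
  · rw [hceq]
    exact pvAHit a k1 k2 h hk2 x1 y1 x2 y2
      (by rw [e1]; exact hp0) (by rw [e1]; exact hp1)
      (by rw [e2]; exact hq0) (by rw [e2]; exact hq1) hx hy m3 m4
  · have h' : k2 < k1 := lt_of_le_of_ne h (Ne.symm hne)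
    have := pvAHit a k2 k1 h' hk1 x2 y2 x1 y1
      (by rw [e2]; exact hq0) (by rw [e2]; exact hq1)
      (by rw [e1]; exact hp0) (by rw [e1]; exact hp1)
      (Ne.symm hx) (Ne.symm hy) m4 m3
    have harea : (x1 - x2) * (y1 - y2) = (x2 - x1) * (y2 - y1) := by ring
    rw [harea] at this
    rw [hceq]; exact this

theorem pvAInv (a : List (List Int)) :
    0 ≤ getMaximum a ∧ (getMaximum a = 0 ∨ IsCand a (getMaximum a)) := by
  unfold getMaximum
  apply pvFoldlInv (fun r => 0 ≤ r ∧ (r = 0 ∨ IsCand a r))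
  · exact ⟨le_rfl, Or.inl rfl⟩
  · intro acc jp hjp hQ
    rw [PySem.List.mem_enumerate_iff] at hjp
    obtain ⟨k, hk, hjpeq⟩ := hjp
    apply pvFoldlInv (fun r => 0 ≤ r ∧ (r = 0 ∨ IsCand a r))
    · exact hQ
    · intro acc i hi hQ'
      rw [PySem.List.mem_pyRange_one] at hi
      dsimp only
      split_ifs with hcond hmemb
      · exact hQ'
      · -- the max step: the taken value is a candidate
        have hjp1 : jp.1 = (k : Int) := by rw [hjpeq]; simp
        have hilen : i < (a.length : Int) := by
          rw [hjp1] at hi; exact lt_of_lt_of_le hi.2 (by exact_mod_cast Nat.le_of_lt hk)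
        have hp1mem : PySem.List.pyGetD a i [] ∈ a := by
          apply PySem.List.pyGetD_mem
          constructor <;> omega
        have hp2mem : jp.2 ∈ a := by rw [hjpeq]; exact a.getElem_mem hk
        rw [Bool.and_eq_true, PySem.Set.contains_iff, PySem.Set.contains_iff,
          PySem.Set.mem_ofList, PySem.Set.mem_ofList] at hmemb
        push Not at hcond
        have hCand : IsCand a |(PySem.List.pyGetD jp.2 0 0 - PySem.List.pyGetD (PySem.List.pyGetD a i []) 0 0) *
            (PySem.List.pyGetD jp.2 1 0 - PySem.List.pyGetD (PySem.List.pyGetD a i []) 1 0)| :=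
          ⟨PySem.List.pyGetD (PySem.List.pyGetD a i []) 0 0,
            PySem.List.pyGetD (PySem.List.pyGetD a i []) 1 0,
            PySem.List.pyGetD jp.2 0 0, PySem.List.pyGetD jp.2 1 0,
            ⟨_, hp1mem, rfl, rfl⟩, ⟨_, hp2mem, rfl, rfl⟩,
            hmemb.1, hmemb.2, hcond.1, hcond.2, rfl⟩
        rcases max_choice acc (|(PySem.List.pyGetD jp.2 0 0 - PySem.List.pyGetD (PySem.List.pyGetD a i []) 0 0) *
            (PySem.List.pyGetD jp.2 1 0 - PySem.List.pyGetD (PySem.List.pyGetD a i []) 1 0)|) with h | h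
        · rw [h]; exact hQ'
        · rw [h]; exact ⟨abs_nonneg _, Or.inr hCand⟩
      · exact hQ'

-- ===== B-side lemmas =====

theorem pvBHit (a : List (List Int)) (k1 k2 : Nat) (hk : k1 < k2)
    (h2 : k2 < (pvColsOf a).keys.length) (ya yb : Int) (hy : ya ≠ yb)
    (hya1 : PvPt a ((pvColsOf a).keys[k2]'h2) ya)
    (hya2 : [(pvColsOf a).keys[k1]'(lt_trans hk h2), ya] ∈ a)
    (hyb1 : PvPt a ((pvColsOf a).keys[k1]'(lt_trans hk h2)) yb)
    (hyb2 : [(pvColsOf a).keys[k2]'h2, yb] ∈ a) :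
    |(pvColsOf a).keys[k2]'h2 - (pvColsOf a).keys[k1]'(lt_trans hk h2)| * |yb - ya| ≤
      getMaximum_alt a := by
  have hk1 : k1 < (pvColsOf a).keys.length := lt_trans hk h2
  unfold getMaximum_alt
  apply pvFoldlGe
  · intro acc jp _
    apply pvFoldlMono
    intro acc i _
    dsimp only
    split_ifs <;> simp
  · refine ⟨(k2 : Int), ?_, ?_⟩
    · rw [PySem.List.mem_pyRange_one]
      exact ⟨Int.natCast_nonneg k2, by exact_mod_cast h2⟩
    · intro acc
      apply pvFoldlGe
      · intro acc i _
        dsimp only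
        split_ifs <;> simp
      · refine ⟨(k1 : Int), ?_, ?_⟩
        · rw [PySem.List.mem_pyRange_one]
          exact ⟨Int.natCast_nonneg k1, by exact_mod_cast hk⟩
        · intro acc
          dsimp only
          rw [PySem.List.pyGetD_natCast, PySem.List.pyGetD_natCast,
            List.getD_eq_getElem _ _ hk1, List.getD_eq_getElem _ _ h2]
          set s12 := ((pvColsOf a).getD ((pvColsOf a).keys[k2]'h2) PySem.Set.empty).filter
            (fun y => PySem.Set.contains (PySem.Set.ofList a)
              [(pvColsOf a).keys[k1]'hk1, y]) with hs12
          set s21 := ((pvColsOf a).getD ((pvColsOf a).keys[k1]'hk1) PySem.Set.empty).filter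
            (fun y => PySem.Set.contains (PySem.Set.ofList a)
              [(pvColsOf a).keys[k2]'h2, y]) with hs21
          have hya : ya ∈ s12 := (pvMemS a _ _ ya).mpr ⟨hya1, hya2⟩
          have hyb : yb ∈ s21 := (pvMemS a _ _ yb).mpr ⟨hyb1, hyb2⟩
          rw [if_pos ⟨List.ne_nil_of_mem hya, List.ne_nil_of_mem hyb⟩]
          cases hmx12 : PySem.List.max? s12 (fun y => y) with
          | none => rw [PySem.List.max?_eq_none_iff] at hmx12; rw [hmx12] at hya; cases hya
          | some mx12 =>
          cases hmn21 : PySem.List.min? s21 (fun y => y) with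
          | none => rw [PySem.List.min?_eq_none_iff] at hmn21; rw [hmn21] at hyb; cases hyb
          | some mn21 =>
          cases hmx21 : PySem.List.max? s21 (fun y => y) with
          | none => rw [PySem.List.max?_eq_none_iff] at hmx21; rw [hmx21] at hyb; cases hyb
          | some mx21 =>
          cases hmn12 : PySem.List.min? s12 (fun y => y) with
          | none => rw [PySem.List.min?_eq_none_iff] at hmn12; rw [hmn12] at hya; cases hya
          | some mn12 =>
          simp only [Option.getD_some]
          have b1 := PySem.List.min?_isMin hmn12 ya hya
          have b2 := PySem.List.max?_isMax hmx12 ya hya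
          have b3 := PySem.List.min?_isMin hmn21 yb hyb
          have b4 := PySem.List.max?_isMax hmx21 yb hyb
          simp only at b1 b2 b3 b4
          have habs : |yb - ya| ≤ max (mx12 - mn21) (mx21 - mn12) := by
            rw [abs_le]
            constructor
            · have := le_max_left (mx12 - mn21) (mx21 - mn12); omega
            · have := le_max_right (mx12 - mn21) (mx21 - mn12); omega
          have hdpos : 0 < max (mx12 - mn21) (mx21 - mn12) :=
            lt_of_lt_of_le (abs_pos.mpr (sub_ne_zero.mpr (Ne.symm hy))) habs
          rw [if_pos hdpos]
          exact le_trans (mul_le_mul_of_nonneg_left habs (abs_nonneg _)) (le_max_right acc _)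

theorem pvBUb (a : List (List Int)) (c : Int) (hc : IsCand a c) : c ≤ getMaximum_alt a := by
  obtain ⟨x1, y1, x2, y2, hP1, hP2, m3, m4, hx, hy, hceq⟩ := hc
  obtain ⟨p, hp, hp0, hp1⟩ := hP1
  obtain ⟨q, hq, hq0, hq1⟩ := hP2
  have hx1k : x1 ∈ (pvColsOf a).keys := (pvMemKeys a x1).mpr ⟨p, hp, hp0⟩
  have hx2k : x2 ∈ (pvColsOf a).keys := (pvMemKeys a x2).mpr ⟨q, hq, hq0⟩
  obtain ⟨k1, hk1, e1⟩ := List.mem_iff_getElem.mp hx1k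
  obtain ⟨k2, hk2, e2⟩ := List.mem_iff_getElem.mp hx2k
  have hne : k1 ≠ k2 := by intro h; subst h; rw [e1] at e2; exact hx e2
  rw [hceq, abs_mul]
  rcases Nat.lt_or_ge k1 k2 with h | h
  · -- columns k1 ↦ x1, k2 ↦ x2: ya = y2 sits in s12, yb = y1 in s21
    have := pvBHit a k1 k2 h hk2 y2 y1 (Ne.symm hy)
      (by rw [e2]; exact ⟨q, hq, hq0, hq1⟩) (by rw [e1]; exact m3)
      (by rw [e1]; exact ⟨p, hp, hp0, hp1⟩) (by rw [e2]; exact m4)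
    rw [e1, e2, abs_sub_comm y1 y2] at this
    exact this
  · have h' : k2 < k1 := lt_of_le_of_ne h (Ne.symm hne)
    have := pvBHit a k2 k1 h' hk1 y1 y2 hy
      (by rw [e1]; exact ⟨p, hp, hp0, hp1⟩) (by rw [e2]; exact m4)
      (by rw [e2]; exact ⟨q, hq, hq0, hq1⟩) (by rw [e1]; exact m3)
    rw [e1, e2, abs_sub_comm x1 x2] at this
    exact this

theorem pvBInv (a : List (List Int)) :
    0 ≤ getMaximum_alt a ∧ (getMaximum_alt a = 0 ∨ IsCand a (getMaximum_alt a)) := by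
  unfold getMaximum_alt
  apply pvFoldlInv (fun r => 0 ≤ r ∧ (r = 0 ∨ IsCand a r))
  · exact ⟨le_rfl, Or.inl rfl⟩
  · intro acc j hj hQ
    rw [PySem.List.mem_pyRange_one] at hj
    apply pvFoldlInv (fun r => 0 ≤ r ∧ (r = 0 ∨ IsCand a r))
    · exact hQ
    · intro acc i hi hQ'
      rw [PySem.List.mem_pyRange_one] at hi
      dsimp only
      split_ifs with hne hd
      · -- the max step: the taken value is a candidate
        have hilen : i < ((pvColsOf a).keys.length : Int) := lt_of_lt_of_le hi.2 (le_of_lt hj.2)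
        have hi' : i.toNat < (pvColsOf a).keys.length := by omega
        have hj' : j.toNat < (pvColsOf a).keys.length := by omega
        have hxi : PySem.List.pyGetD (pvColsOf a).keys i 0 = (pvColsOf a).keys[i.toNat] :=
          PySem.List.pyGetD_eq_getElem _ _ hi.1 hilen
        have hxj : PySem.List.pyGetD (pvColsOf a).keys j 0 = (pvColsOf a).keys[j.toNat] :=
          PySem.List.pyGetD_eq_getElem _ _ hj.1 hj.2
        rw [hxi, hxj] at hne hd ⊢
        set xi := (pvColsOf a).keys[i.toNat] with hxid
        set xj := (pvColsOf a).keys[j.toNat] with hxjd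
        have hxne : xi ≠ xj := by
          intro hcontra
          have := (List.Nodup.getElem_inj_iff (pvColsKeysNodup a)).mp hcontra
          omega
        set s12 := ((pvColsOf a).getD xj PySem.Set.empty).filter
          (fun y => PySem.Set.contains (PySem.Set.ofList a) [xi, y]) with hs12
        set s21 := ((pvColsOf a).getD xi PySem.Set.empty).filter
          (fun y => PySem.Set.contains (PySem.Set.ofList a) [xj, y]) with hs21
        cases hmx12 : PySem.List.max? s12 (fun y => y) with
        | none => rw [PySem.List.max?_eq_none_iff] at hmx12; exact absurd hmx12 hne.1
        | some mx12 =>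
        cases hmn21 : PySem.List.min? s21 (fun y => y) with
        | none => rw [PySem.List.min?_eq_none_iff] at hmn21; exact absurd hmn21 hne.2
        | some mn21 =>
        cases hmx21 : PySem.List.max? s21 (fun y => y) with
        | none => rw [PySem.List.max?_eq_none_iff] at hmx21; exact absurd hmx21 hne.2
        | some mx21 =>
        cases hmn12 : PySem.List.min? s12 (fun y => y) with
        | none => rw [PySem.List.min?_eq_none_iff] at hmn12; exact absurd hmn12 hne.1
        | some mn12 =>
        rw [hmx12, hmn21, hmx21, hmn12] at hd
        simp only [Option.getD_some] at hd ⊢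
        have hmx12p := (pvMemS a xj xi mx12).mp (PySem.List.max?_mem hmx12)
        have hmn12p := (pvMemS a xj xi mn12).mp (PySem.List.min?_mem hmn12)
        have hmx21p := (pvMemS a xi xj mx21).mp (PySem.List.max?_mem hmx21)
        have hmn21p := (pvMemS a xi xj mn21).mp (PySem.List.min?_mem hmn21)
        have hCand : IsCand a (|xj - xi| * max (mx12 - mn21) (mx21 - mn12)) := by
          rcases max_choice (mx12 - mn21) (mx21 - mn12) with hcase | hcase <;> rw [hcase] at hd ⊢
          · -- d = mx12 - mn21 > 0 : diagonal (xi, mn21) – (xj, mx12)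
            refine ⟨xi, mn21, xj, mx12, hmn21p.1, hmx12p.1, hmx12p.2, hmn21p.2,
              hxne, by omega, ?_⟩
            rw [abs_mul, abs_of_pos (by omega : (0:Int) < mx12 - mn21)]
          · -- d = mx21 - mn12 > 0 : diagonal (xi, mx21) – (xj, mn12)
            refine ⟨xi, mx21, xj, mn12, hmx21p.1, hmn12p.1, hmn12p.2, hmx21p.2,
              hxne, by omega, ?_⟩
            rw [abs_mul, abs_sub_comm mn12 mx21, abs_of_pos (by omega : (0:Int) < mx21 - mn12)]
        rcases max_choice acc (|xj - xi| * max (mx12 - mn21) (mx21 - mn12)) with h | h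
        · rw [h]; exact hQ'
        · rw [h]
          exact ⟨mul_nonneg (abs_nonneg _) (by omega), Or.inr hCand⟩
      · exact hQ'
      · exact hQ'

-- ===== VERDICT (by name: the statement is the Claim_ definition above) =====
theorem getMaximum_spec : Claim_equal_getMaximum := by
  intro a _ _
  unfold Spec_getMaximum
  obtain ⟨ha0, haC⟩ := pvAInv a
  obtain ⟨hb0, hbC⟩ := pvBInv a
  apply le_antisymm
  · rcases haC with h | h
    · omega
    · exact pvBUb a _ h
  · rcases hbC with h | h
    · omega
    · exact pvAUb a _ h
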